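-- pv_equiv track=rewrite | github.com/masterzenith/code-pattern-practice | algoexpert/DynamicProgramming/hard/square_of_zeroes.py | pre_compute_num_of_zeroes
-- ===== SOURCE A (Python) =====
-- def pre_compute_num_of_zeroes(matrix):
--     info_matrix = [[x for x in row] for row in matrix]
--     n = len(matrix)
--     for row in range(n):
--         for col in range(n):
--             num_zeroes = 1 if matrix[row][col] == 0 else 0
--             info_matrix[row][col] = {
--                 "num_zeroes_below": num_zeroes,
--                 "num_zeroes_right": num_zeroes,
--             }
--     last_idx = len(matrix) - 1
--     for row in reversed(range(n)):
--         for col in reversed(range(n)):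
--             if matrix[row][col] == 1:
--                 continue
--             if row < last_idx:
--                 info_matrix[row][col]["num_zeroes_below"] += info_matrix[row+1][col]["num_zeroes_below"]
--             if col < last_idx:
--                 info_matrix[row][col]["num_zeroes_right"] += info_matrix[row][col+1]["num_zeroes_right"]
--     return info_matrix
-- ===== SOURCE B (Python) =====
-- def pre_compute_num_of_zeroes(matrix):
--     n = len(matrix)
--     info = [list(row) for row in matrix]
--     for col in range(n):
--         count = 0
--         for row in range(n - 1, -1, -1):
--             x = matrix[row][col]
--             if x == 1:
--                 count = 0
--             elif x == 0:
--                 count += 1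
--             info[row][col] = {"num_zeroes_below": count}
--     for row in range(n):
--         count = 0
--         for col in range(n - 1, -1, -1):
--             x = matrix[row][col]
--             if x == 1:
--                 count = 0
--             elif x == 0:
--                 count += 1
--             info[row][col]["num_zeroes_right"] = count
--     return info
-- ===== Notes on version B (the rewrite author's own statement) =====
-- stated objective: alternative
-- what changed: Replaces the single reversed DP that initialises per-cell dicts and then adds neighbour-dict entries in one combined pass by two independent direction-specific scans (one bottom-up per column, one right-to-left per row), each carrying a scalar running counter, so no neighbour cell is ever read.
import Mathlib
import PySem

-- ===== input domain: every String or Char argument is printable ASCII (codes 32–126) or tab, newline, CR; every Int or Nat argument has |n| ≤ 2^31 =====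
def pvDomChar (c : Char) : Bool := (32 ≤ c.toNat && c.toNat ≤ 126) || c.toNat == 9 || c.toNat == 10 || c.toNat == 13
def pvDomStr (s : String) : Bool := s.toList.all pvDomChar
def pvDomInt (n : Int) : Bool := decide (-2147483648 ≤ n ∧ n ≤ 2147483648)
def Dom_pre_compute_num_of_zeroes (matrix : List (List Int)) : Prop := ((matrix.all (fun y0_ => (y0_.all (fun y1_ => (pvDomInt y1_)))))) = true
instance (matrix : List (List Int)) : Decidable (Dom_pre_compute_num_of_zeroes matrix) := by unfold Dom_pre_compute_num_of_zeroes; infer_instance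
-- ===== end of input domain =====

-- B replaces A's single reversed DP (per-cell dicts updated from neighbour dicts) by two
-- independent direction-specific scans, each carrying a scalar running counter (objective: alternative).

-- ===== PORT A =====
-- in-range 2-D read matrix[r][c] / info[r][c] (Pre_ guarantees indices are in range)
def pvGet2 {α : Type} (g : List (List α)) (r c : Int) (d : α) : α :=
  PySem.List.pyGetD (PySem.List.pyGetD g r []) c d
-- in-range 2-D assignment info[r][c] = v (indices are nonnegative and in range under Pre_)
def pvSet2 {α : Type} (g : List (List α)) (r c : Int) (v : α) : List (List α) :=
  g.modify r.toNat (fun row => row.set c.toNat v)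
-- the dict literal {"num_zeroes_below": z, "num_zeroes_right": z}
def pvDictInit (z : Int) : PySem.Dict String Int :=
  (PySem.Dict.empty.insert "num_zeroes_below" z).insert "num_zeroes_right" z
-- body of A's first double loop (fixed row, iterating col)
def pvA1 (matrix : List (List Int)) (row : Int) (info : List (List (PySem.Dict String Int)))
    (col : Int) : List (List (PySem.Dict String Int)) :=
  let num_zeroes : Int := if pvGet2 matrix row col 0 = 0 then 1 else 0
  pvSet2 info row col (pvDictInit num_zeroes)
-- body of A's second (reversed) double loop
def pvA2 (matrix : List (List Int)) (last_idx row : Int)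
    (info : List (List (PySem.Dict String Int))) (col : Int) :
    List (List (PySem.Dict String Int)) :=
  if pvGet2 matrix row col 0 = 1 then info
  else
    let info :=
      if row < last_idx then
        pvSet2 info row col ((pvGet2 info row col PySem.Dict.empty).modify "num_zeroes_below" 0
          (· + (pvGet2 info (row + 1) col PySem.Dict.empty).getD "num_zeroes_below" 0))
      else info
    let info :=
      if col < last_idx then
        pvSet2 info row col ((pvGet2 info row col PySem.Dict.empty).modify "num_zeroes_right" 0
          (· + (pvGet2 info row (col + 1) PySem.Dict.empty).getD "num_zeroes_right" 0))
      else info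
    info

def pre_compute_num_of_zeroes (matrix : List (List Int)) : List (List (List (String × Int))) :=
  -- info_matrix = [[x for x in row] for row in matrix]; the copied ints are all overwritten by
  -- dicts in the first loop (Pre_), so the copy is initialised with empty dicts of the dict type
  let info0 : List (List (PySem.Dict String Int)) :=
    matrix.map (fun row => row.map (fun _ => PySem.Dict.empty))
  let n : Int := matrix.length
  let info1 := (PySem.List.pyRange 0 n 1).foldl
    (fun info row => (PySem.List.pyRange 0 n 1).foldl (pvA1 matrix row) info) info0
  let last_idx : Int := (matrix.length : Int) - 1
  let info2 := ((PySem.List.pyRange 0 n 1).reverse).foldl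
    (fun info row => ((PySem.List.pyRange 0 n 1).reverse).foldl (pvA2 matrix last_idx row) info) info1
  info2.map (fun row => row.map PySem.Dict.items)

-- ===== PORT B =====
-- body of B's first pass inner loop (fixed col, row runs n-1..0; state = (count, info))
def pvB1 (matrix : List (List Int)) (col : Int)
    (st : Int × List (List (PySem.Dict String Int))) (row : Int) :
    Int × List (List (PySem.Dict String Int)) :=
  let x := pvGet2 matrix row col 0
  let count : Int := if x = 1 then 0 else if x = 0 then st.1 + 1 else st.1
  (count, pvSet2 st.2 row col (PySem.Dict.empty.insert "num_zeroes_below" count))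
-- body of B's second pass inner loop (fixed row, col runs n-1..0)
def pvB2 (matrix : List (List Int)) (row : Int)
    (st : Int × List (List (PySem.Dict String Int))) (col : Int) :
    Int × List (List (PySem.Dict String Int)) :=
  let x := pvGet2 matrix row col 0
  let count : Int := if x = 1 then 0 else if x = 0 then st.1 + 1 else st.1
  (count, pvSet2 st.2 row col ((pvGet2 st.2 row col PySem.Dict.empty).insert "num_zeroes_right" count))

def pre_compute_num_of_zeroes_alt (matrix : List (List Int)) : List (List (List (String × Int))) :=
  -- info = [list(row) for row in matrix]; the copied ints are all overwritten by dicts in the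
  -- first pass (Pre_), so the copy is initialised with empty dicts of the dict type
  let n : Int := matrix.length
  let info0 : List (List (PySem.Dict String Int)) :=
    matrix.map (fun row => row.map (fun _ => PySem.Dict.empty))
  let info1 := (PySem.List.pyRange 0 n 1).foldl
    (fun info col => ((PySem.List.pyRange (n - 1) (-1) (-1)).foldl (pvB1 matrix col) ((0 : Int), info)).2)
    info0
  let info2 := (PySem.List.pyRange 0 n 1).foldl
    (fun info row => ((PySem.List.pyRange (n - 1) (-1) (-1)).foldl (pvB2 matrix row) ((0 : Int), info)).2)
    info1
  info2.map (fun row => row.map PySem.Dict.items)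

-- ===== PRECONDITION & SPEC =====
-- Pre_ excludes ragged input: a row shorter than len(matrix) makes A raise IndexError, and a
-- longer row makes A return a list still containing raw ints (not a value of the declared type).
def Pre_pre_compute_num_of_zeroes (matrix : List (List Int)) : Prop :=
  ∀ row ∈ matrix, row.length = matrix.length
instance (matrix : List (List Int)) : Decidable (Pre_pre_compute_num_of_zeroes matrix) := by
  unfold Pre_pre_compute_num_of_zeroes; infer_instance
def pvWitness_pre_compute_num_of_zeroes : List (List Int) := [[0, 1], [1, 0]]

def Spec_pre_compute_num_of_zeroes (matrix : List (List Int)) (out : List (List (List (String × Int)))) : Prop := out = pre_compute_num_of_zeroes_alt matrix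
instance (matrix : List (List Int)) (out : List (List (List (String × Int)))) : Decidable (Spec_pre_compute_num_of_zeroes matrix out) := by unfold Spec_pre_compute_num_of_zeroes; infer_instance

-- ===== CLAIM (what is proved, stated in full; the proofs are below) =====
def Claim_equal_pre_compute_num_of_zeroes : Prop := ∀ (matrix : List (List Int)), Dom_pre_compute_num_of_zeroes matrix → Pre_pre_compute_num_of_zeroes matrix → Spec_pre_compute_num_of_zeroes matrix (pre_compute_num_of_zeroes matrix)

-- ===== LEMMAS AND PROOFS =====

-- matrix[r][c] with Nat indices
def cellN (m : List (List Int)) (r c : Nat) : Int := (m.getD r []).getD c 0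
-- the shared counter recurrence
def stepZ (x cnt : Int) : Int := if x = 1 then 0 else if x = 0 then cnt + 1 else cnt
-- consecutive-zero DP value downwards from (r, col)
def belowF (m : List (List Int)) (col : Nat) (r : Nat) : Int :=
  if _h : r < m.length then stepZ (cellN m r col) (belowF m col (r + 1)) else 0
termination_by m.length - r
-- the analogous right-direction value
def rightF (m : List (List Int)) (r : Nat) (c : Nat) : Int :=
  if _h : c < m.length then stepZ (cellN m r c) (rightF m r (c + 1)) else 0
termination_by m.length - c

def getN (g : List (List (PySem.Dict String Int))) (r c : Nat) : PySem.Dict String Int :=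
  (g.getD r []).getD c PySem.Dict.empty

-- "g is the n x n grid described pointwise by f"
def GridIs (n : Nat) (g : List (List (PySem.Dict String Int)))
    (f : Nat → Nat → PySem.Dict String Int) : Prop :=
  g.length = n ∧ (∀ r, r < n → (g.getD r []).length = n) ∧
    (∀ r c, r < n → c < n → getN g r c = f r c)

def mkD (b r : Int) : PySem.Dict String Int :=
  (PySem.Dict.empty.insert "num_zeroes_below" b).insert "num_zeroes_right" r

def initDm (m : List (List Int)) (r c : Nat) : PySem.Dict String Int :=
  pvDictInit (if cellN m r c = 0 then 1 else 0)

def finalD (m : List (List Int)) (r c : Nat) : PySem.Dict String Int :=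
  mkD (belowF m c r) (rightF m r c)

def pvTarget (m : List (List Int)) : List (List (List (String × Int))) :=
  (List.range m.length).map (fun r => (List.range m.length).map (fun c => (finalD m r c).items))

theorem belowF_eq_step {m : List (List Int)} {col r : Nat} (h : r < m.length) :
    belowF m col r = stepZ (cellN m r col) (belowF m col (r + 1)) := by
  rw [belowF]; simp [h]

theorem belowF_eq_zero {m : List (List Int)} (col : Nat) {r : Nat} (h : ¬ r < m.length) :
    belowF m col r = 0 := by
  rw [belowF]; simp [h]

theorem rightF_eq_step {m : List (List Int)} {r c : Nat} (h : c < m.length) :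
    rightF m r c = stepZ (cellN m r c) (rightF m r (c + 1)) := by
  rw [rightF]; simp [h]

theorem rightF_eq_zero {m : List (List Int)} (r : Nat) {c : Nat} (h : ¬ c < m.length) :
    rightF m r c = 0 := by
  rw [rightF]; simp [h]

theorem stepZ_one (cnt : Int) : stepZ 1 cnt = 0 := by simp [stepZ]

theorem stepZ_ne_one {x : Int} (hx : ¬ x = 1) (cnt : Int) :
    stepZ x cnt = (if x = 0 then 1 else 0) + cnt := by
  unfold stepZ
  rw [if_neg hx]
  by_cases h0 : x = 0
  · rw [if_pos h0, if_pos h0]; ring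
  · rw [if_neg h0, if_neg h0]; ring

theorem mkD_getD_below (b r : Int) : (mkD b r).getD "num_zeroes_below" 0 = b := by rfl

theorem mkD_getD_right (b r : Int) : (mkD b r).getD "num_zeroes_right" 0 = r := by rfl

theorem mkD_modify_below (b r x : Int) :
    (mkD b r).modify "num_zeroes_below" 0 (· + x) = mkD (b + x) r := by rfl

theorem mkD_modify_right (b r x : Int) :
    (mkD b r).modify "num_zeroes_right" 0 (· + x) = mkD b (r + x) := by rfl

theorem initDm_eq (m : List (List Int)) (r c : Nat) :
    pvDictInit (if cellN m r c = 0 then 1 else 0) = initDm m r c := rfl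

theorem initDm_mkD (m : List (List Int)) (r c : Nat) :
    initDm m r c = mkD (if cellN m r c = 0 then 1 else 0) (if cellN m r c = 0 then 1 else 0) := rfl

theorem finalD_mkD (m : List (List Int)) (r c : Nat) :
    finalD m r c = mkD (belowF m c r) (rightF m r c) := rfl

theorem natCastSub (k : Nat) : ((k + 1 : Nat) : Int) - 1 = (k : Int) := by push_cast; ring

theorem natCastAdd (k : Nat) : ((k : Nat) : Int) + 1 = ((k + 1 : Nat) : Int) := by push_cast; ring

theorem rev_pyRange (n : Nat) :
    (PySem.List.pyRange 0 (n : Int) 1).reverse = PySem.List.pyRange ((n : Int) - 1) (-1) (-1) := by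
  rw [PySem.List.pyRange_neg_one_eq_reverse]; norm_num

theorem getD_lt {α : Type} (l : List α) (d : α) {i : Nat} (h : i < l.length) :
    l.getD i d = l[i] := by
  rw [List.getD_eq_getElem?_getD, List.getElem?_eq_getElem h]; rfl

theorem getD_map_const {α β : Type} (l : List α) (v d : β) (r : Nat) :
    (l.map (fun _ => v)).getD r d = if r < l.length then v else d := by
  rw [List.getD_eq_getElem?_getD, List.getElem?_map]
  by_cases h : r < l.length
  · rw [List.getElem?_eq_getElem h]; simp [h]
  · rw [List.getElem?_eq_none (by omega)]; simp [h]

theorem getD_map_out {α β : Type} (l : List α) (F : α → List β) (r : Nat) :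
    (l.map F).getD r [] = if h : r < l.length then F l[r] else [] := by
  by_cases h : r < l.length
  · rw [List.getD_eq_getElem?_getD, List.getElem?_map, List.getElem?_eq_getElem h, dif_pos h]
    rfl
  · rw [List.getD_eq_getElem?_getD, List.getElem?_map, List.getElem?_eq_none (by omega), dif_neg h]
    rfl

theorem gridIs_congr {n : Nat} {g : List (List (PySem.Dict String Int))}
    {f f' : Nat → Nat → PySem.Dict String Int}
    (h : GridIs n g f) (hf : ∀ r c, r < n → c < n → f r c = f' r c) : GridIs n g f' := by
  obtain ⟨h1, h2, h3⟩ := h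
  exact ⟨h1, h2, fun r c hr hc => (h3 r c hr hc).trans (hf r c hr hc)⟩

theorem pvGet2_natCast {α : Type} (g : List (List α)) (r c : Nat) (d : α) :
    pvGet2 g (r : Int) (c : Int) d = (g.getD r []).getD c d := by
  simp [pvGet2]

theorem cell_natCast (m : List (List Int)) (r c : Nat) :
    pvGet2 m (r : Int) (c : Int) 0 = cellN m r c := by
  simp [pvGet2, cellN]

theorem getN_of_gridIs {n : Nat} {g : List (List (PySem.Dict String Int))}
    {f : Nat → Nat → PySem.Dict String Int} (h : GridIs n g f) {r c : Nat}
    (hr : r < n) (hc : c < n) : pvGet2 g (r : Int) (c : Int) PySem.Dict.empty = f r c := by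
  rw [pvGet2_natCast]; exact h.2.2 r c hr hc

theorem getD_modify_lt {α : Type} (g : List (List α)) (r j : Nat) (F : List α → List α)
    (hj : j < g.length) :
    (g.modify r F).getD j [] = if r = j then F (g.getD j []) else g.getD j [] := by
  rw [List.getD_eq_getElem?_getD, List.getElem?_modify, List.getElem?_eq_getElem hj,
    List.getD_eq_getElem?_getD, List.getElem?_eq_getElem hj]
  by_cases h : r = j <;> simp [h]

theorem getD_set_lt {α : Type} (row : List α) (c j : Nat) (v d : α) (hc : c < row.length) :
    (row.set c v).getD j d = if c = j then v else row.getD j d := by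
  rw [List.getD_eq_getElem?_getD, List.getD_eq_getElem?_getD]
  by_cases h : c = j
  · subst h; rw [List.getElem?_set_self hc]; simp
  · rw [List.getElem?_set_ne h]; simp [h]

theorem gridIs_set {n : Nat} {g : List (List (PySem.Dict String Int))}
    {f : Nat → Nat → PySem.Dict String Int} (h : GridIs n g f) {r c : Nat}
    (hr : r < n) (hc : c < n) (v : PySem.Dict String Int) :
    GridIs n (pvSet2 g (r : Int) (c : Int) v)
      (fun r' c' => if r' = r ∧ c' = c then v else f r' c') := by
  obtain ⟨h1, h2, h3⟩ := h
  have hset : pvSet2 g (r : Int) (c : Int) v = g.modify r (fun row => row.set c v) := by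
    simp [pvSet2]
  rw [hset]
  refine ⟨by simp [List.length_modify, h1], ?_, ?_⟩
  · intro r' hr'
    rw [getD_modify_lt _ _ _ _ (by omega)]
    by_cases hrr : r = r'
    · rw [if_pos hrr, List.length_set]; exact h2 r' hr'
    · rw [if_neg hrr]; exact h2 r' hr'
  · intro r' c' hr' hc'
    simp only [getN]
    rw [getD_modify_lt _ _ _ _ (by omega)]
    by_cases hR : r = r'
    · rw [if_pos hR]
      rw [getD_set_lt _ _ _ _ _ (by rw [h2 r' hr']; omega)]
      by_cases hC : c = c'
      · rw [if_pos hC, if_pos ⟨hR.symm, hC.symm⟩]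
      · rw [if_neg hC, if_neg (fun hh => hC hh.2.symm)]
        exact h3 r' c' hr' hc'
    · rw [if_neg hR, if_neg (fun hh => hR hh.1.symm)]
      exact h3 r' c' hr' hc'

theorem gridIs_eq {n : Nat} {g : List (List (PySem.Dict String Int))}
    {f : Nat → Nat → PySem.Dict String Int} (h : GridIs n g f) :
    g = (List.range n).map (fun r => (List.range n).map (fun c => f r c)) := by
  obtain ⟨h1, h2, h3⟩ := h
  apply List.ext_getElem?
  intro i
  rw [List.getElem?_map]
  by_cases hin : i < n
  · rw [List.getElem?_range hin, List.getElem?_eq_getElem (by omega : i < g.length)]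
    simp only [Option.map_some]
    congr 1
    have hrow : g.getD i [] = g[i] := getD_lt _ _ (by omega)
    have hlen : g[i].length = n := by rw [← hrow]; exact h2 i hin
    apply List.ext_getElem?
    intro j
    rw [List.getElem?_map]
    by_cases hjn : j < n
    · rw [List.getElem?_range hjn, List.getElem?_eq_getElem (by omega : j < g[i].length)]
      simp only [Option.map_some]
      have hcell : g[i][j] = getN g i j := by
        simp only [getN, hrow]
        exact (getD_lt _ _ (by omega)).symm
      rw [hcell, h3 i j hin hjn]
    · rw [List.getElem?_eq_none (by omega : g[i].length ≤ j),
        List.getElem?_eq_none (by simp; omega)]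
      rfl
  · rw [List.getElem?_eq_none (by omega : g.length ≤ i),
      List.getElem?_eq_none (by simp; omega)]
    rfl

-- ===== B-side pass lemmas =====

theorem b1_inner (m : List (List Int)) (col : Nat) (hcol : col < m.length) :
    ∀ (k : Nat), k ≤ m.length → ∀ g f, GridIs m.length g f →
    GridIs m.length
      (((PySem.List.pyRange ((k : Int) - 1) (-1) (-1)).foldl (pvB1 m (col : Int))
        (belowF m col k, g)).2)
      (fun r c => if c = col ∧ r < k then PySem.Dict.empty.insert "num_zeroes_below" (belowF m col r)
        else f r c) := by
  intro k
  induction k with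
  | zero =>
    intro _ g f hg
    rw [show ((0 : Nat) : Int) - 1 = (-1 : Int) by norm_num,
      PySem.List.pyRange_neg_one_eq_nil (le_refl (-1 : Int))]
    simp only [List.foldl_nil]
    exact gridIs_congr hg (by intro r c _ _; simp)
  | succ k ih =>
    intro hk g f hg
    have hkn : k < m.length := by omega
    rw [natCastSub k, PySem.List.pyRange_neg_one_cons (by omega : (-1 : Int) < (k : Int))]
    simp only [List.foldl_cons]
    have hstep : pvB1 m (col : Int) (belowF m col (k + 1), g) (k : Int)
        = (belowF m col k,
            pvSet2 g (k : Int) (col : Int)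
              (PySem.Dict.empty.insert "num_zeroes_below" (belowF m col k))) := by
      simp only [pvB1]
      rw [cell_natCast]
      rw [show (if cellN m k col = 1 then (0 : Int)
            else if cellN m k col = 0 then belowF m col (k + 1) + 1 else belowF m col (k + 1))
          = belowF m col k by rw [belowF_eq_step hkn]; rfl]
    rw [hstep]
    have hg1 := gridIs_set hg hkn hcol (PySem.Dict.empty.insert "num_zeroes_below" (belowF m col k))
    have h := ih (by omega) _ _ hg1
    refine gridIs_congr h ?_
    intro r c hr hc
    by_cases hcc : c = col
    · by_cases hrk : r < k
      · simp [hcc, hrk, show r < k + 1 from by omega, show ¬ r = k from by omega]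
      · by_cases hrk2 : r = k
        · simp [hcc, hrk, hrk2, show k < k + 1 from by omega]
        · simp [hcc, hrk, hrk2, show ¬ r < k + 1 from by omega]
    · simp [hcc]

theorem b1_outer (m : List (List Int)) :
    ∀ (j : Nat), j ≤ m.length → ∀ g f, GridIs m.length g f →
    GridIs m.length
      ((PySem.List.pyRange 0 (j : Int) 1).foldl
        (fun info col =>
          ((PySem.List.pyRange ((m.length : Int) - 1) (-1) (-1)).foldl (pvB1 m col)
            ((0 : Int), info)).2) g)
      (fun r c => if c < j then PySem.Dict.empty.insert "num_zeroes_below" (belowF m c r) else f r c) := by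
  intro j
  induction j with
  | zero =>
    intro _ g f hg
    rw [show ((0 : Nat) : Int) = (0 : Int) by norm_num, PySem.List.pyRange_one_eq_nil (le_refl (0 : Int))]
    simp only [List.foldl_nil]
    exact gridIs_congr hg (by intro r c _ _; simp)
  | succ j ih =>
    intro hj g f hg
    have hjn : j < m.length := by omega
    rw [← natCastAdd j, PySem.List.pyRange_one_succ_right (by omega : (0 : Int) ≤ (j : Int)),
      List.foldl_append]
    simp only [List.foldl_cons, List.foldl_nil]
    have hG := ih (by omega) g f hg
    have h := b1_inner m j hjn m.length le_rfl _ _ hG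
    rw [belowF_eq_zero j (by omega)] at h
    refine gridIs_congr h ?_
    intro r c hr hc
    by_cases hcc : c = j
    · simp [hcc, hr, show ¬ j < j from by omega, show j < j + 1 from by omega]
    · by_cases hlt : c < j
      · simp [hcc, hlt, show c < j + 1 from by omega]
      · simp [hcc, hlt, show ¬ c < j + 1 from by omega]

theorem b2_inner (m : List (List Int)) (row : Nat) (hrow : row < m.length) :
    ∀ (k : Nat), k ≤ m.length → ∀ g f, GridIs m.length g f →
    GridIs m.length
      (((PySem.List.pyRange ((k : Int) - 1) (-1) (-1)).foldl (pvB2 m (row : Int))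
        (rightF m row k, g)).2)
      (fun r c => if r = row ∧ c < k then (f row c).insert "num_zeroes_right" (rightF m row c)
        else f r c) := by
  intro k
  induction k with
  | zero =>
    intro _ g f hg
    rw [show ((0 : Nat) : Int) - 1 = (-1 : Int) by norm_num,
      PySem.List.pyRange_neg_one_eq_nil (le_refl (-1 : Int))]
    simp only [List.foldl_nil]
    exact gridIs_congr hg (by intro r c _ _; simp)
  | succ k ih =>
    intro hk g f hg
    have hkn : k < m.length := by omega
    rw [natCastSub k, PySem.List.pyRange_neg_one_cons (by omega : (-1 : Int) < (k : Int))]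
    simp only [List.foldl_cons]
    have hstep : pvB2 m (row : Int) (rightF m row (k + 1), g) (k : Int)
        = (rightF m row k,
            pvSet2 g (row : Int) (k : Int)
              ((f row k).insert "num_zeroes_right" (rightF m row k))) := by
      simp only [pvB2]
      rw [cell_natCast, getN_of_gridIs hg hrow hkn]
      rw [show (if cellN m row k = 1 then (0 : Int)
            else if cellN m row k = 0 then rightF m row (k + 1) + 1 else rightF m row (k + 1))
          = rightF m row k by rw [rightF_eq_step hkn]; rfl]
    rw [hstep]
    have hg1 := gridIs_set hg hrow hkn ((f row k).insert "num_zeroes_right" (rightF m row k))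
    have h := ih (by omega) _ _ hg1
    refine gridIs_congr h ?_
    intro r c hr hc
    by_cases hrr : r = row
    · by_cases hck : c < k
      · simp [hrr, hck, show c < k + 1 from by omega, show ¬ c = k from by omega]
      · by_cases hck2 : c = k
        · simp [hrr, hck, hck2, show k < k + 1 from by omega]
        · simp [hrr, hck, hck2, show ¬ c < k + 1 from by omega]
    · simp [hrr]

theorem b2_outer (m : List (List Int)) :
    ∀ (j : Nat), j ≤ m.length → ∀ g f, GridIs m.length g f →
    GridIs m.length
      ((PySem.List.pyRange 0 (j : Int) 1).foldl
        (fun info row =>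
          ((PySem.List.pyRange ((m.length : Int) - 1) (-1) (-1)).foldl (pvB2 m row)
            ((0 : Int), info)).2) g)
      (fun r c => if r < j then (f r c).insert "num_zeroes_right" (rightF m r c) else f r c) := by
  intro j
  induction j with
  | zero =>
    intro _ g f hg
    rw [show ((0 : Nat) : Int) = (0 : Int) by norm_num, PySem.List.pyRange_one_eq_nil (le_refl (0 : Int))]
    simp only [List.foldl_nil]
    exact gridIs_congr hg (by intro r c _ _; simp)
  | succ j ih =>
    intro hj g f hg
    have hjn : j < m.length := by omega
    rw [← natCastAdd j, PySem.List.pyRange_one_succ_right (by omega : (0 : Int) ≤ (j : Int)),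
      List.foldl_append]
    simp only [List.foldl_cons, List.foldl_nil]
    have hG := ih (by omega) g f hg
    have h := b2_inner m j hjn m.length le_rfl _ _ hG
    rw [rightF_eq_zero j (by omega)] at h
    refine gridIs_congr h ?_
    intro r c hr hc
    by_cases hrr : r = j
    · simp [hrr, hc, show ¬ j < j from by omega, show j < j + 1 from by omega]
    · by_cases hlt : r < j
      · simp [hrr, hlt, show r < j + 1 from by omega]
      · simp [hrr, hlt, show ¬ r < j + 1 from by omega]

-- ===== A-side pass lemmas =====

theorem a1_inner (m : List (List Int)) (row : Nat) (hrow : row < m.length) :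
    ∀ (j : Nat), j ≤ m.length → ∀ g f, GridIs m.length g f →
    GridIs m.length
      ((PySem.List.pyRange 0 (j : Int) 1).foldl (pvA1 m (row : Int)) g)
      (fun r c => if r = row ∧ c < j then initDm m r c else f r c) := by
  intro j
  induction j with
  | zero =>
    intro _ g f hg
    rw [show ((0 : Nat) : Int) = (0 : Int) by norm_num, PySem.List.pyRange_one_eq_nil (le_refl (0 : Int))]
    simp only [List.foldl_nil]
    exact gridIs_congr hg (by intro r c _ _; simp)
  | succ j ih =>
    intro hj g f hg
    have hjn : j < m.length := by omega
    rw [← natCastAdd j, PySem.List.pyRange_one_succ_right (by omega : (0 : Int) ≤ (j : Int)),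
      List.foldl_append]
    simp only [List.foldl_cons, List.foldl_nil]
    have hG := ih (by omega) g f hg
    have hA1 : ∀ G, pvA1 m (row : Int) G (j : Int)
        = pvSet2 G (row : Int) (j : Int) (initDm m row j) := by
      intro G
      simp only [pvA1]
      rw [cell_natCast, initDm_eq]
    rw [hA1]
    have h := gridIs_set hG hrow hjn (initDm m row j)
    refine gridIs_congr h ?_
    intro r c hr hc
    by_cases hrr : r = row
    · by_cases hcj : c < j
      · simp [hrr, hcj, show c < j + 1 from by omega, show ¬ c = j from by omega]
      · by_cases hcj2 : c = j
        · simp [hrr, hcj, hcj2, show j < j + 1 from by omega]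
        · simp [hrr, hcj, hcj2, show ¬ c < j + 1 from by omega]
    · simp [hrr]

theorem a1_outer (m : List (List Int)) :
    ∀ (i : Nat), i ≤ m.length → ∀ g f, GridIs m.length g f →
    GridIs m.length
      ((PySem.List.pyRange 0 (i : Int) 1).foldl
        (fun info row => (PySem.List.pyRange 0 (m.length : Int) 1).foldl (pvA1 m row) info) g)
      (fun r c => if r < i then initDm m r c else f r c) := by
  intro i
  induction i with
  | zero =>
    intro _ g f hg
    rw [show ((0 : Nat) : Int) = (0 : Int) by norm_num, PySem.List.pyRange_one_eq_nil (le_refl (0 : Int))]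
    simp only [List.foldl_nil]
    exact gridIs_congr hg (by intro r c _ _; simp)
  | succ i ih =>
    intro hi g f hg
    have hin : i < m.length := by omega
    rw [← natCastAdd i, PySem.List.pyRange_one_succ_right (by omega : (0 : Int) ≤ (i : Int)),
      List.foldl_append]
    simp only [List.foldl_cons, List.foldl_nil]
    have hG := ih (by omega) g f hg
    have h := a1_inner m i hin m.length le_rfl _ _ hG
    refine gridIs_congr h ?_
    intro r c hr hc
    by_cases hrr : r = i
    · simp [hrr, hc, show i < i + 1 from by omega]
    · by_cases hlt : r < i
      · simp [hrr, hlt, show r < i + 1 from by omega]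
      · simp [hrr, hlt, show ¬ r < i + 1 from by omega]

theorem a2_inner (m : List (List Int)) (r0 : Nat) (hr0 : r0 < m.length) :
    ∀ (j : Nat), j ≤ m.length → ∀ g f, GridIs m.length g f →
    (∀ c, c < m.length → f r0 c = if j ≤ c then finalD m r0 c else initDm m r0 c) →
    (∀ c, c < m.length → r0 + 1 < m.length → f (r0 + 1) c = finalD m (r0 + 1) c) →
    GridIs m.length
      ((PySem.List.pyRange ((j : Int) - 1) (-1) (-1)).foldl
        (pvA2 m ((m.length : Int) - 1) (r0 : Int)) g)
      (fun r c => if r = r0 ∧ c < j then finalD m r c else f r c) := by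
  intro j
  induction j with
  | zero =>
    intro _ g f hg _ _
    rw [show ((0 : Nat) : Int) - 1 = (-1 : Int) by norm_num,
      PySem.List.pyRange_neg_one_eq_nil (le_refl (-1 : Int))]
    simp only [List.foldl_nil]
    exact gridIs_congr hg (by intro r c _ _; simp)
  | succ j ih =>
    intro hj g f hg hrowh hnext
    have hjn : j < m.length := by omega
    rw [natCastSub j, PySem.List.pyRange_neg_one_cons (by omega : (-1 : Int) < (j : Int))]
    simp only [List.foldl_cons]
    have hstep : GridIs m.length (pvA2 m ((m.length : Int) - 1) (r0 : Int) g (j : Int))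
        (fun r c => if r = r0 ∧ c = j then finalD m r c else f r c) := by
      simp only [pvA2]
      rw [cell_natCast]
      by_cases hx : cellN m r0 j = 1
      · rw [if_pos hx]
        refine gridIs_congr hg ?_
        intro r c hr hc
        by_cases hrr : r = r0 ∧ c = j
        · obtain ⟨rfl, rfl⟩ := hrr
          rw [if_pos (show _ ∧ _ from ⟨rfl, rfl⟩)]
          rw [show f r c = initDm m r c from by rw [hrowh c hc, if_neg (by omega)]]
          rw [initDm_mkD, if_neg (show ¬ cellN m r c = 0 from by rw [hx]; norm_num), finalD_mkD,
            belowF_eq_step hr0, rightF_eq_step hjn, hx, stepZ_one, stepZ_one]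
        · rw [if_neg hrr]
      · rw [if_neg hx]
        have hzb : (if cellN m r0 j = 0 then (1 : Int) else 0) + belowF m j (r0 + 1)
            = belowF m j r0 := by
          rw [belowF_eq_step hr0, stepZ_ne_one hx]
        have hzr : (if cellN m r0 j = 0 then (1 : Int) else 0) + rightF m r0 (j + 1)
            = rightF m r0 j := by
          rw [rightF_eq_step hjn, stepZ_ne_one hx]
        have hfr0j : f r0 j = mkD (if cellN m r0 j = 0 then (1 : Int) else 0)
            (if cellN m r0 j = 0 then (1 : Int) else 0) := by
          rw [hrowh j hjn, if_neg (by omega), initDm_mkD]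
        by_cases hb : r0 + 1 < m.length
        · rw [if_pos (show ((r0 : Nat) : Int) < (m.length : Int) - 1 by omega)]
          rw [getN_of_gridIs hg hr0 hjn, natCastAdd r0,
            getN_of_gridIs hg (show r0 + 1 < m.length from hb) hjn,
            hnext j hjn hb, hfr0j, finalD_mkD, mkD_getD_below, mkD_modify_below, hzb]
          have hg1 := gridIs_set hg hr0 hjn
            (mkD (belowF m j r0) (if cellN m r0 j = 0 then (1 : Int) else 0))
          by_cases hc2 : j + 1 < m.length
          · rw [if_pos (show ((j : Nat) : Int) < (m.length : Int) - 1 by omega)]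
            rw [getN_of_gridIs hg1 hr0 hjn, if_pos (show _ ∧ _ from ⟨rfl, rfl⟩), natCastAdd j,
              getN_of_gridIs hg1 hr0 (show j + 1 < m.length from hc2),
              if_neg (show ¬(r0 = r0 ∧ j + 1 = j) from fun hh => by omega),
              hrowh (j + 1) hc2, if_pos (show j + 1 ≤ j + 1 from le_rfl), finalD_mkD, mkD_getD_right,
              mkD_modify_right, hzr]
            have hg2 := gridIs_set hg1 hr0 hjn (mkD (belowF m j r0) (rightF m r0 j))
            refine gridIs_congr hg2 ?_
            intro r c hr hc
            by_cases hrr : r = r0 ∧ c = j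
            · obtain ⟨rfl, rfl⟩ := hrr
              rw [if_pos (show _ ∧ _ from ⟨rfl, rfl⟩), if_pos (show _ ∧ _ from ⟨rfl, rfl⟩), finalD_mkD]
            · rw [if_neg hrr, if_neg hrr, if_neg hrr]
          · rw [if_neg (show ¬ ((j : Nat) : Int) < (m.length : Int) - 1 by omega)]
            refine gridIs_congr hg1 ?_
            intro r c hr hc
            by_cases hrr : r = r0 ∧ c = j
            · obtain ⟨rfl, rfl⟩ := hrr
              rw [if_pos (show _ ∧ _ from ⟨rfl, rfl⟩), if_pos (show _ ∧ _ from ⟨rfl, rfl⟩), finalD_mkD,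
                show rightF m r c = (if cellN m r c = 0 then (1 : Int) else 0) from by
                  rw [← hzr, rightF_eq_zero r (show ¬ c + 1 < m.length from hc2)]; ring]
            · rw [if_neg hrr, if_neg hrr]
        · rw [if_neg (show ¬ ((r0 : Nat) : Int) < (m.length : Int) - 1 by omega)]
          have hbz : belowF m j r0 = (if cellN m r0 j = 0 then (1 : Int) else 0) := by
            rw [← hzb, belowF_eq_zero j (show ¬ r0 + 1 < m.length from hb)]; ring
          by_cases hc2 : j + 1 < m.length
          · rw [if_pos (show ((j : Nat) : Int) < (m.length : Int) - 1 by omega)]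
            rw [getN_of_gridIs hg hr0 hjn, natCastAdd j,
              getN_of_gridIs hg hr0 (show j + 1 < m.length from hc2),
              hrowh (j + 1) hc2, if_pos (show j + 1 ≤ j + 1 from le_rfl), hfr0j, finalD_mkD, mkD_getD_right,
              mkD_modify_right, hzr]
            have hg2 := gridIs_set hg hr0 hjn
              (mkD (if cellN m r0 j = 0 then (1 : Int) else 0) (rightF m r0 j))
            refine gridIs_congr hg2 ?_
            intro r c hr hc
            by_cases hrr : r = r0 ∧ c = j
            · obtain ⟨rfl, rfl⟩ := hrr
              rw [if_pos (show _ ∧ _ from ⟨rfl, rfl⟩), if_pos (show _ ∧ _ from ⟨rfl, rfl⟩), finalD_mkD, hbz]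
            · rw [if_neg hrr, if_neg hrr]
          · rw [if_neg (show ¬ ((j : Nat) : Int) < (m.length : Int) - 1 by omega)]
            refine gridIs_congr hg ?_
            intro r c hr hc
            by_cases hrr : r = r0 ∧ c = j
            · obtain ⟨rfl, rfl⟩ := hrr
              rw [if_pos (show _ ∧ _ from ⟨rfl, rfl⟩), hrowh c hc, if_neg (by omega), initDm_mkD, finalD_mkD, hbz,
                show rightF m r c = (if cellN m r c = 0 then (1 : Int) else 0) from by
                  rw [← hzr, rightF_eq_zero r (show ¬ c + 1 < m.length from hc2)]; ring]
            · rw [if_neg hrr]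
    refine gridIs_congr (ih (by omega) _ _ hstep ?_ ?_) ?_
    · intro c hc
      by_cases hcj : c = j
      · simp [hcj]
      · rw [if_neg (show ¬(r0 = r0 ∧ c = j) from fun hh => hcj hh.2), hrowh c hc]
        by_cases hle : j ≤ c
        · rw [if_pos (show j + 1 ≤ c from by omega), if_pos hle]
        · rw [if_neg (show ¬ j + 1 ≤ c from by omega), if_neg hle]
    · intro c hc hb
      rw [if_neg (show ¬(r0 + 1 = r0 ∧ c = j) from fun hh => by omega)]
      exact hnext c hc hb
    · intro r c hr hc
      by_cases hrr : r = r0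
      · by_cases hcj : c < j
        · simp [hrr, hcj, show c < j + 1 from by omega]
        · by_cases hcj2 : c = j
          · simp [hrr, hcj, hcj2, show j < j + 1 from by omega]
          · simp [hrr, hcj, hcj2, show ¬ c < j + 1 from by omega]
      · simp [hrr]

theorem a2_outer (m : List (List Int)) :
    ∀ (k : Nat), k ≤ m.length → ∀ g f, GridIs m.length g f →
    (∀ r c, r < m.length → c < m.length → k ≤ r → f r c = finalD m r c) →
    (∀ r c, r < m.length → c < m.length → r < k → f r c = initDm m r c) →
    GridIs m.length
      ((PySem.List.pyRange ((k : Int) - 1) (-1) (-1)).foldl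
        (fun info row =>
          (PySem.List.pyRange ((m.length : Int) - 1) (-1) (-1)).foldl
            (pvA2 m ((m.length : Int) - 1) row) info) g)
      (fun r c => if r < k then finalD m r c else f r c) := by
  intro k
  induction k with
  | zero =>
    intro _ g f hg _ _
    rw [show ((0 : Nat) : Int) - 1 = (-1 : Int) by norm_num,
      PySem.List.pyRange_neg_one_eq_nil (le_refl (-1 : Int))]
    simp only [List.foldl_nil]
    exact gridIs_congr hg (by intro r c _ _; simp)
  | succ k ih =>
    intro hk g f hg hfin hinit
    have hkn : k < m.length := by omega
    rw [natCastSub k, PySem.List.pyRange_neg_one_cons (by omega : (-1 : Int) < (k : Int))]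
    simp only [List.foldl_cons]
    have hrowh : ∀ c, c < m.length → f k c
        = if m.length ≤ c then finalD m k c else initDm m k c := by
      intro c hc
      rw [if_neg (by omega)]
      exact hinit k c hkn hc (by omega)
    have hnext : ∀ c, c < m.length → k + 1 < m.length → f (k + 1) c = finalD m (k + 1) c := by
      intro c hc hb
      exact hfin (k + 1) c hb hc (by omega)
    have hE := a2_inner m k hkn m.length le_rfl g f hg hrowh hnext
    refine gridIs_congr (ih (by omega) _ _ hE ?_ ?_) ?_
    · intro r c hr hc hkr
      by_cases hrk : r = k
      · simp [hrk, hc]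
      · rw [if_neg (show ¬(r = k ∧ c < m.length) from fun hh => hrk hh.1)]
        exact hfin r c hr hc (by omega)
    · intro r c hr hc hrk
      rw [if_neg (show ¬(r = k ∧ c < m.length) from fun hh => by omega)]
      exact hinit r c hr hc (by omega)
    · intro r c hr hc
      by_cases hlt : r < k
      · simp [hlt, show r < k + 1 from by omega]
      · by_cases hrk : r = k
        · simp [hlt, hrk, hc, show k < k + 1 from by omega]
        · simp [hlt, hrk, show ¬ r < k + 1 from by omega]

-- ===== main equalities =====

theorem a_eq (m : List (List Int)) (hpre : Pre_pre_compute_num_of_zeroes m) :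
    pre_compute_num_of_zeroes m = pvTarget m := by
  have h0 : GridIs m.length (m.map (fun row => row.map (fun _ => PySem.Dict.empty)))
      (fun _ _ => PySem.Dict.empty) := by
    refine ⟨by simp, ?_, ?_⟩
    · intro r hr
      rw [getD_map_out, dif_pos hr, List.length_map]
      exact hpre _ (List.getElem_mem hr)
    · intro r c hr hc
      simp only [getN]
      rw [getD_map_out, dif_pos hr, getD_map_const]
      exact ite_self _
  have h1 := a1_outer m m.length le_rfl _ _ h0
  have h1' : GridIs m.length
      ((PySem.List.pyRange 0 (m.length : Int) 1).foldl
        (fun info row => (PySem.List.pyRange 0 (m.length : Int) 1).foldl (pvA1 m row) info)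
        (m.map (fun row => row.map (fun _ => PySem.Dict.empty))))
      (fun r c => initDm m r c) :=
    gridIs_congr h1 (by intro r c hr hc; rw [if_pos hr])
  have h2 := a2_outer m m.length le_rfl _ _ h1'
    (by intro r c hr hc hkr; omega)
    (by intro r c hr hc hrk; rfl)
  have h2' : GridIs m.length
      ((PySem.List.pyRange ((m.length : Int) - 1) (-1) (-1)).foldl
        (fun info row =>
          (PySem.List.pyRange ((m.length : Int) - 1) (-1) (-1)).foldl
            (pvA2 m ((m.length : Int) - 1) row) info)
        ((PySem.List.pyRange 0 (m.length : Int) 1).foldl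
          (fun info row => (PySem.List.pyRange 0 (m.length : Int) 1).foldl (pvA1 m row) info)
          (m.map (fun row => row.map (fun _ => PySem.Dict.empty)))))
      (fun r c => finalD m r c) :=
    gridIs_congr h2 (by intro r c hr hc; rw [if_pos hr])
  show ((((PySem.List.pyRange 0 (m.length : Int) 1).reverse).foldl
      (fun info row => ((PySem.List.pyRange 0 (m.length : Int) 1).reverse).foldl
        (pvA2 m ((m.length : Int) - 1) row) info)
      ((PySem.List.pyRange 0 (m.length : Int) 1).foldl
        (fun info row => (PySem.List.pyRange 0 (m.length : Int) 1).foldl (pvA1 m row) info)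
        (m.map (fun row => row.map (fun _ => PySem.Dict.empty))))).map
      (fun row => row.map PySem.Dict.items)) = pvTarget m
  rw [rev_pyRange]
  rw [gridIs_eq h2']
  unfold pvTarget
  simp [List.map_map, Function.comp_def]

theorem b_eq (m : List (List Int)) (hpre : Pre_pre_compute_num_of_zeroes m) :
    pre_compute_num_of_zeroes_alt m = pvTarget m := by
  have h0 : GridIs m.length (m.map (fun row => row.map (fun _ => PySem.Dict.empty)))
      (fun _ _ => PySem.Dict.empty) := by
    refine ⟨by simp, ?_, ?_⟩
    · intro r hr
      rw [getD_map_out, dif_pos hr, List.length_map]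
      exact hpre _ (List.getElem_mem hr)
    · intro r c hr hc
      simp only [getN]
      rw [getD_map_out, dif_pos hr, getD_map_const]
      exact ite_self _
  have h1 := b1_outer m m.length le_rfl _ _ h0
  have h1' : GridIs m.length
      ((PySem.List.pyRange 0 (m.length : Int) 1).foldl
        (fun info col =>
          ((PySem.List.pyRange ((m.length : Int) - 1) (-1) (-1)).foldl (pvB1 m col)
            ((0 : Int), info)).2)
        (m.map (fun row => row.map (fun _ => PySem.Dict.empty))))
      (fun r c => PySem.Dict.empty.insert "num_zeroes_below" (belowF m c r)) :=
    gridIs_congr h1 (by intro r c hr hc; rw [if_pos hc])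
  have h2 := b2_outer m m.length le_rfl _ _ h1'
  have h2' : GridIs m.length
      ((PySem.List.pyRange 0 (m.length : Int) 1).foldl
        (fun info row =>
          ((PySem.List.pyRange ((m.length : Int) - 1) (-1) (-1)).foldl (pvB2 m row)
            ((0 : Int), info)).2)
        ((PySem.List.pyRange 0 (m.length : Int) 1).foldl
          (fun info col =>
            ((PySem.List.pyRange ((m.length : Int) - 1) (-1) (-1)).foldl (pvB1 m col)
              ((0 : Int), info)).2)
          (m.map (fun row => row.map (fun _ => PySem.Dict.empty)))))
      (fun r c => finalD m r c) :=
    gridIs_congr h2 (by intro r c hr hc; rw [if_pos hr]; rfl)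
  show ((((PySem.List.pyRange 0 (m.length : Int) 1)).foldl
      (fun info row =>
        ((PySem.List.pyRange ((m.length : Int) - 1) (-1) (-1)).foldl (pvB2 m row)
          ((0 : Int), info)).2)
      ((PySem.List.pyRange 0 (m.length : Int) 1).foldl
        (fun info col =>
          ((PySem.List.pyRange ((m.length : Int) - 1) (-1) (-1)).foldl (pvB1 m col)
            ((0 : Int), info)).2)
        (m.map (fun row => row.map (fun _ => PySem.Dict.empty))))).map
      (fun row => row.map PySem.Dict.items)) = pvTarget m
  rw [gridIs_eq h2']
  unfold pvTarget
  simp [List.map_map, Function.comp_def]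

-- ===== VERDICT (by name: the statement is the Claim_ definition above) =====
theorem pre_compute_num_of_zeroes_spec : Claim_equal_pre_compute_num_of_zeroes := by
  intro m _hdom hpre
  unfold Spec_pre_compute_num_of_zeroes
  rw [a_eq m hpre, b_eq m hpre]
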